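-- pv_equiv track=rewrite | github.com/CodeMario/Algorithm | 프로그래머스/0/120869. 외계어 사전/외계어 사전.py | solution
-- ===== SOURCE A (Python) =====
-- def spelling(spell,dic) :
--     used = []
--     for i in dic :
--         if i in used :
--             return False
--         elif i in spell :
--             used.append(i)
--             continue
--         else :
--             return False
--     return True
--
-- def solution(spell, dic):
--     answer = 2
--     for i in dic :
--         if spelling(spell,i) :
--             if len(i) == len(spell) :
--                 answer = 1
--                 break
--     return answer
-- ===== SOURCE B (Python) =====
-- def solution(spell, dic):
--     # A word matches iff it is an anagram of spell and spell itself has no repeated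
--     # letters: sort spell once and compare each word's sorted letters against that key.
--     if len(set(spell)) != len(spell):
--         return 2
--     key = sorted(spell)
--     for w in dic:
--         if sorted(w) == key:
--             return 1
--     return 2
-- ===== Notes on version B (the rewrite author's own statement) =====
-- stated objective: alternative
-- what changed: Replaces the per-word character scan with its 'used' list and spell-membership tests by a sorting-based anagram algorithm: B rejects upfront if spell has duplicate letters, sorts spell once into a key, and matches each word by comparing its sorted letters to that key (a matching word is exactly an anagram of a duplicate-free spell).
import Mathlib
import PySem

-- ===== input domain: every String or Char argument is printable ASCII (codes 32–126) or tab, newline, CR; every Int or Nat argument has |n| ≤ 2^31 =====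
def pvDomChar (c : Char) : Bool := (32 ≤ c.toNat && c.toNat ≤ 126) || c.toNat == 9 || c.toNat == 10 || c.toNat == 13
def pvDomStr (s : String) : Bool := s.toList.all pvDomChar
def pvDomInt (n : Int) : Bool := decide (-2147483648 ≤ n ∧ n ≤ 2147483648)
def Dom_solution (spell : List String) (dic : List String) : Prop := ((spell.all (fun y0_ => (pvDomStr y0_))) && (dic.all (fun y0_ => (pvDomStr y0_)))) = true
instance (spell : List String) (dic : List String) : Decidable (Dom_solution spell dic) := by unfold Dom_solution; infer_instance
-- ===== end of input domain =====

-- B replaces A's per-character scan (with a 'used' list and spell-membership tests) by a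
-- sorting-based anagram test against a once-sorted, duplicate-free spell key: alternative algorithm.

-- ===== PORT A =====
-- spelling(spell, dic): scan the word's characters keeping a 'used' list
def spellingLoop (spell : List String) (used : List String) : List Char → Bool
  | [] => true
  | c :: rest =>
    let s := String.ofList [c]
    if used.contains s then false
    else if spell.contains s then spellingLoop spell (used ++ [s]) rest
    else false

def spelling (spell : List String) (w : String) : Bool :=
  spellingLoop spell [] w.toList

-- the for-loop with answer = 2 and break on the first hit
def solLoop (spell : List String) : List String → Int
  | [] => 2
  | w :: rest =>
    if spelling spell w then
      if PySem.Str.len w == (spell.length : Int) then 1 else solLoop spell rest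
    else solLoop spell rest

def solution (spell : List String) (dic : List String) : Int :=
  solLoop spell dic

-- ===== PORT B =====
-- for w in dic: if sorted(w) == key: return 1
def anagramLoop (key : List String) : List String → Int
  | [] => 2
  | w :: rest =>
    if PySem.List.sorted (w.toList.map (fun c => String.ofList [c])) (fun x => x) false == key
    then 1 else anagramLoop key rest

def solution_alt (spell : List String) (dic : List String) : Int :=
  if PySem.Set.len (PySem.Set.ofList spell) != (spell.length : Int) then 2
  else anagramLoop (PySem.List.sorted spell (fun x => x) false) dic

-- ===== PRECONDITION & SPEC =====
def Spec_solution (spell : List String) (dic : List String) (out : Int) : Prop := out = solution_alt spell dic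
instance (spell : List String) (dic : List String) (out : Int) : Decidable (Spec_solution spell dic out) := by unfold Spec_solution; infer_instance

-- ===== CLAIM (what is proved, stated in full; the proofs are below) =====
def Claim_equal_solution : Prop := ∀ (spell : List String) (dic : List String), Dom_solution spell dic → Spec_solution spell dic (solution spell dic)

-- ===== LEMMAS AND PROOFS =====

-- A's guard for one word, characterised
theorem spellingLoop_iff (spell : List String) (cs : List Char) : ∀ (used : List String),
    spellingLoop spell used cs = true ↔
      ((cs.map (fun c => String.ofList [c])).Nodup ∧
       (∀ s ∈ cs.map (fun c => String.ofList [c]), s ∉ used) ∧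
       (∀ s ∈ cs.map (fun c => String.ofList [c]), s ∈ spell)) := by
  induction cs with
  | nil => intro used; simp [spellingLoop]
  | cons c rest ih =>
    intro used
    simp only [spellingLoop, List.map_cons]
    by_cases hu : String.ofList [c] ∈ used
    · simp [hu]
    · by_cases hs : String.ofList [c] ∈ spell
      · rw [if_neg (by simp [hu]), if_pos (by simp [hs])]
        rw [ih (used ++ [String.ofList [c]])]
        constructor
        · rintro ⟨hnd, hnu, hsp⟩
          refine ⟨List.nodup_cons.mpr ⟨fun hc => (hnu _ hc) (by simp), hnd⟩, ?_, ?_⟩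
          · intro s hsm
            rcases List.mem_cons.mp hsm with h | h
            · exact h ▸ hu
            · intro hin; exact (hnu s h) (by simp [hin])
          · intro s hsm
            rcases List.mem_cons.mp hsm with h | h
            · exact h ▸ hs
            · exact hsp s h
        · rintro ⟨hnd, hnu, hsp⟩
          rcases List.nodup_cons.mp hnd with ⟨hnotin, hnd'⟩
          refine ⟨hnd', ?_, fun s hsm => hsp s (List.mem_cons_of_mem _ hsm)⟩
          intro s hsm hin
          rcases List.mem_append.mp hin with h | h
          · exact hnu s (List.mem_cons_of_mem _ hsm) h
          · simp only [List.mem_singleton] at h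
            exact hnotin (h ▸ hsm)
      · simp only [List.contains_eq_mem, hu, hs, decide_false,
          Bool.false_eq_true, if_false]
        constructor
        · intro h; exact absurd h (by simp)
        · rintro ⟨-, -, hsp⟩
          exact absurd (hsp _ (List.mem_cons_self)) hs

theorem guard_iff_perm (spell : List String) (w : String) :
    ((spelling spell w) = true ∧ PySem.Str.len w = (spell.length : Int)) ↔
      (spell.Nodup ∧ (w.toList.map (fun c => String.ofList [c])).Perm spell) := by
  rw [spelling, spellingLoop_iff]
  set wc := w.toList.map (fun c => String.ofList [c]) with hwc
  have hlen : PySem.Str.len w = (wc.length : Int) := by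
    simp [PySem.Str.len, hwc]
  constructor
  · rintro ⟨⟨hnd, -, hsp⟩, hl⟩
    have hlen' : wc.length = spell.length := by omega
    have hsub : wc.Subperm spell := List.Nodup.subperm hnd (fun x hx => hsp x hx)
    have hperm : wc.Perm spell := hsub.perm_of_length_le (by omega)
    exact ⟨hperm.nodup_iff.mp hnd, hperm⟩
  · rintro ⟨hspnd, hperm⟩
    refine ⟨⟨hperm.nodup_iff.mpr hspnd, by simp, fun s hs => hperm.mem_iff.mp hs⟩, ?_⟩
    rw [hlen, hperm.length_eq]


theorem ofList_sublist {α : Type} [BEq α] [LawfulBEq α] (xs : List α) :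
    List.Sublist (PySem.Set.ofList xs) xs := by
  induction xs with
  | nil => simp [PySem.Set.ofList_nil]
  | cons x xs ih =>
    rw [PySem.Set.ofList_cons]
    have hd : List.Sublist (PySem.Set.discard (PySem.Set.ofList xs) x) (PySem.Set.ofList xs) := by
      simp only [PySem.Set.discard]; exact List.filter_sublist
    exact List.Sublist.cons₂ x (hd.trans ih)

theorem nodup_iff_setlen (spell : List String) :
    spell.Nodup ↔ (PySem.Set.ofList spell).length = spell.length := by
  constructor
  · intro h; rw [PySem.Set.ofList_eq_self_of_nodup spell h]
  · intro h
    have he : PySem.Set.ofList spell = spell := (ofList_sublist spell).eq_of_length h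
    simpa [he] using PySem.Set.nodup_ofList (xs := spell)

-- A's guard as a Bool, under each spell shape
theorem guard_eq_nodup (spell : List String) (h : spell.Nodup) (w : String) :
    ((spelling spell w) && (PySem.Str.len w == (spell.length : Int))) =
      (PySem.List.sorted (w.toList.map (fun c => String.ofList [c])) (fun x => x) false ==
        PySem.List.sorted spell (fun x => x) false) := by
  rw [Bool.eq_iff_iff]
  simp only [Bool.and_eq_true, beq_iff_eq]
  rw [guard_iff_perm, PySem.List.sorted_id_eq_sorted_id_iff_perm]
  exact ⟨fun ⟨_, hp⟩ => hp, fun hp => ⟨h, hp⟩⟩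

theorem guardFalseA (spell : List String) (h : ¬ spell.Nodup) (w : String) :
    ((spelling spell w) && (PySem.Str.len w == (spell.length : Int))) = false := by
  rw [Bool.eq_iff_iff]
  simp only [Bool.and_eq_true, beq_iff_eq, Bool.false_eq_true, iff_false]
  rw [guard_iff_perm]
  rintro ⟨hn, -⟩; exact h hn

-- when spell has a duplicate, A's guard never fires
theorem solLoop_of_not_nodup (spell : List String) (h : ¬ spell.Nodup) :
    ∀ dic : List String, solLoop spell dic = 2
  | [] => rfl
  | w :: rest => by
    have hg := guardFalseA spell h w
    simp only [solLoop]
    cases h1 : spelling spell w <;>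
      cases h2 : (PySem.Str.len w == (spell.length : Int)) <;>
        simp_all [solLoop_of_not_nodup spell h rest]

theorem loop_eq_of_nodup (spell : List String) (h : spell.Nodup) :
    ∀ dic : List String, solLoop spell dic = anagramLoop (PySem.List.sorted spell (fun x => x) false) dic
  | [] => rfl
  | w :: rest => by
    have hg := guard_eq_nodup spell h w
    simp only [solLoop, anagramLoop, ← hg]
    cases h1 : spelling spell w <;>
      cases h2 : (PySem.Str.len w == (spell.length : Int)) <;>
        simp_all [loop_eq_of_nodup spell h rest]

-- ===== VERDICT (by name: the statement is the Claim_ definition above) =====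
theorem solution_spec : Claim_equal_solution := by
  intro spell dic _
  unfold Spec_solution solution solution_alt
  by_cases h : spell.Nodup
  · rw [if_neg (by simp [bne, PySem.Set.len, (nodup_iff_setlen spell).mp h]),
      loop_eq_of_nodup spell h]
  · have hne : (PySem.Set.ofList spell).length ≠ spell.length :=
      fun hc => h ((nodup_iff_setlen spell).mpr hc)
    rw [if_pos (by simp [bne, PySem.Set.len, hne]), solLoop_of_not_nodup spell h]
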